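-- pv_equiv track=rewrite | github.com/steveroe317/covid-backend | scripts/results_tables.py | make_tagged_results_table
-- ===== SOURCE A (Python) =====
-- from collections import defaultdict
--
-- def make_tagged_results_table(tags, queries, query_results):
--
--     dates = set()
--     for query_name in queries:
--         dates |= set(query_results[query_name].keys())
--
--     tagged_results = {}
--     for date in dates:
--         tagged_results[date] = {}
--         for name in queries:
--             tokens = name.split(':')
--             tag_tuple = tuple(tokens[:-1])
--             metric_name = tokens[-1]
--             if tag_tuple not in tagged_results[date]:
--                 tagged_results[date][tag_tuple] = defaultdict(int)
--             tagged_results[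
--                 date][tag_tuple][metric_name] = query_results[name][date]
--
--     metric_names = set()
--     for date in dates:
--         for tag_tuple in tagged_results[date].keys():
--             metric_names |= set(tagged_results[date][tag_tuple].keys())
--     metric_columns = sorted(metric_names)
--
--     header_row = ['Date'] + tags + metric_columns
--     rows = [header_row]
--     for date in sorted(dates):
--         for tag_tuple in sorted(tagged_results[date].keys()):
--             data_row = [date]
--             data_row.extend(tag_tuple)
--             for metric in metric_columns:
--                 data_row.append(str(tagged_results[date][tag_tuple][metric]))
--             rows.append(data_row)
--
--     return rows
-- ===== SOURCE B (Python) =====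
-- def make_tagged_results_table(tags, queries, query_results):
--     # One parse pass over queries: flat (tag_tuple, metric) -> query name lookup
--     # (later queries overwrite earlier ones), plus the tag-tuple and metric sets.
--     lookup = {}
--     tag_tuples = set()
--     metrics = set()
--     for name in queries:
--         tokens = name.split(':')
--         tag_tuple = tuple(tokens[:-1])
--         metric = tokens[-1]
--         lookup[(tag_tuple, metric)] = name
--         tag_tuples.add(tag_tuple)
--         metrics.add(metric)
--
--     dates = set()
--     for name in queries:
--         dates.update(query_results[name].keys())
--
--     metric_columns = sorted(metrics)
--     rows = [['Date'] + tags + metric_columns]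
--     for date in sorted(dates):
--         for tag_tuple in sorted(tag_tuples):
--             row = [date]
--             row.extend(tag_tuple)
--             for metric in metric_columns:
--                 name = lookup.get((tag_tuple, metric))
--                 row.append(str(query_results[name][date]) if name is not None else '0')
--             rows.append(row)
--     return rows
-- ===== Notes on version B (the rewrite author's own statement) =====
-- stated objective: simpler
-- what changed: B replaces A's per-date rebuild of a nested date->tag->metric dict-of-dicts by a single parse pass over the queries that builds a flat (tag_tuple, metric) -> query-name lookup plus tag/metric sets, and then emits the rows directly from that lookup.
-- outside the precondition, e.g. on make_tagged_results_table(['t'], ['a:m'], {'a:m': {}}): A returns [['Date', 't']], B returns [['Date', 't', 'm']]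
import Mathlib
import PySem

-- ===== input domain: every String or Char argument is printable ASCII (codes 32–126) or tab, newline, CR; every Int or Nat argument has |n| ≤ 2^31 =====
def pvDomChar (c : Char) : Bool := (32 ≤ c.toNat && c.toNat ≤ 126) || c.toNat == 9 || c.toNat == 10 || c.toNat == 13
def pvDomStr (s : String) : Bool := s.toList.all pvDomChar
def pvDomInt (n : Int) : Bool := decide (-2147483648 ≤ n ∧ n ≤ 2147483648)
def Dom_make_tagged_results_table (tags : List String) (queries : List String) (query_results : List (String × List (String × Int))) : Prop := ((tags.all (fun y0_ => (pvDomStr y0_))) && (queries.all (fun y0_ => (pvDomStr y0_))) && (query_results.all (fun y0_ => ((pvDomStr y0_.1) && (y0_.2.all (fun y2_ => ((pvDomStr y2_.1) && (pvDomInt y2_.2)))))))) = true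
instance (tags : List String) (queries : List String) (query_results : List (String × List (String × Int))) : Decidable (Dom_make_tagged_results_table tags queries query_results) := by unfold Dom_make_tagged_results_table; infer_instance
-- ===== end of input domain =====

-- B replaces A's per-date rebuild of a nested date→tag→metric dict by one parse pass over
-- the queries (a flat (tag,metric)→name lookup plus tag/metric sets) and emits rows directly.

-- ===== PORT A =====
-- dates = set();  for q in queries: dates |= set(query_results[q].keys())
def pvA_dates (query_results : List (String × List (String × Int))) (queries : List String) : PySem.Set String :=
  queries.foldl
    (fun s q => PySem.Set.union s (PySem.Dict.ofList ((PySem.Dict.ofList query_results).getD q [])).keys)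
    PySem.Set.empty

-- the inner loop 'for name in queries: … tagged_results[date][tag_tuple][metric_name] = …'
-- (defaultdict(int) is read back with getD _ 0)
def pvA_inner (query_results : List (String × List (String × Int))) (queries : List String)
    (date : String) : PySem.Dict (List String) (PySem.Dict String Int) :=
  queries.foldl
    (fun td name =>
      let tokens := (PySem.Str.split? name ":").getD []
      let tag := PySem.List.slice tokens none (some (-1))
      let metric := PySem.List.pyGetD tokens (-1) ""
      let td1 := if td.contains tag then td else td.insert tag PySem.Dict.empty
      td1.insert tag ((td1.getD tag PySem.Dict.empty).insert metric
        ((PySem.Dict.ofList ((PySem.Dict.ofList query_results).getD name [])).getD date 0)))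
    PySem.Dict.empty

-- tagged_results = {};  for date in dates: tagged_results[date] = {…inner loop…}
def pvA_tagged (query_results : List (String × List (String × Int))) (queries : List String) :
    PySem.Dict String (PySem.Dict (List String) (PySem.Dict String Int)) :=
  (pvA_dates query_results queries).foldl
    (fun tr date => tr.insert date (pvA_inner query_results queries date))
    PySem.Dict.empty

-- metric_names = set();  for date in dates: for tag_tuple in tagged_results[date].keys(): metric_names |= …
def pvA_metrics (query_results : List (String × List (String × Int))) (queries : List String) :
    PySem.Set String :=
  (pvA_dates query_results queries).foldl
    (fun s date =>
      ((pvA_tagged query_results queries).getD date PySem.Dict.empty).keys.foldl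
        (fun s tag =>
          PySem.Set.union s
            (((pvA_tagged query_results queries).getD date PySem.Dict.empty).getD tag PySem.Dict.empty).keys)
        s)
    PySem.Set.empty

def make_tagged_results_table (tags : List String) (queries : List String) (query_results : List (String × List (String × Int))) : List (List String) :=
  let metric_columns := PySem.List.sorted (pvA_metrics query_results queries) (fun m => m) false
  let header_row := ["Date"] ++ tags ++ metric_columns
  (PySem.List.sorted (pvA_dates query_results queries) (fun d => d) false).foldl
    (fun rows date =>
      (PySem.List.sorted ((pvA_tagged query_results queries).getD date PySem.Dict.empty).keys (fun t => t) false).foldl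
        (fun rows tag_tuple =>
          rows ++ [metric_columns.foldl
            (fun r metric =>
              r ++ [PySem.Int.toStr ((((pvA_tagged query_results queries).getD date PySem.Dict.empty).getD tag_tuple PySem.Dict.empty).getD metric 0)])
            ([date] ++ tag_tuple)])
        rows)
    [header_row]

-- ===== PORT B =====
-- one pass over queries building (lookup, tag_tuples, metrics)
def pvB_parse (queries : List String) :
    PySem.Dict (List String × String) String × PySem.Set (List String) × PySem.Set String :=
  queries.foldl
    (fun acc name =>
      let tokens := (PySem.Str.split? name ":").getD []
      let tag := PySem.List.slice tokens none (some (-1))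
      let metric := PySem.List.pyGetD tokens (-1) ""
      (acc.1.insert (tag, metric) name, PySem.Set.add acc.2.1 tag, PySem.Set.add acc.2.2 metric))
    (PySem.Dict.empty, PySem.Set.empty, PySem.Set.empty)

-- dates = set();  for name in queries: dates.update(query_results[name].keys())
def pvB_dates (query_results : List (String × List (String × Int))) (queries : List String) : PySem.Set String :=
  queries.foldl
    (fun s name => PySem.Set.update s (PySem.Dict.ofList ((PySem.Dict.ofList query_results).getD name [])).keys)
    PySem.Set.empty

def make_tagged_results_table_alt (tags : List String) (queries : List String) (query_results : List (String × List (String × Int))) : List (List String) :=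
  let lookup := (pvB_parse queries).1
  let tag_tuples := (pvB_parse queries).2.1
  let metrics := (pvB_parse queries).2.2
  let metric_columns := PySem.List.sorted metrics (fun m => m) false
  (PySem.List.sorted (pvB_dates query_results queries) (fun d => d) false).foldl
    (fun rows date =>
      (PySem.List.sorted tag_tuples (fun t => t) false).foldl
        (fun rows tag_tuple =>
          rows ++ [metric_columns.foldl
            (fun r metric =>
              r ++ [match lookup.get? (tag_tuple, metric) with
                    | some name => PySem.Int.toStr ((PySem.Dict.ofList ((PySem.Dict.ofList query_results).getD name [])).getD date 0)
                    | none => "0"])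
            ([date] ++ tag_tuple)])
        rows)
    [["Date"] ++ tags ++ metric_columns]

-- ===== PRECONDITION & SPEC =====
def pvKeysOf (query_results : List (String × List (String × Int))) (n : String) : List String :=
  (PySem.Dict.ofList ((PySem.Dict.ofList query_results).getD n [])).keys

-- Pre_ excludes exactly (i) inputs where Python A raises KeyError (a query name missing from
-- query_results, or a query lacking a date that another query has) and (ii) the defensible corner
-- where queries is nonempty but every query's result dict is empty: the table then has no data
-- rows and whether the header lists the metric columns is anybody's choice (A omits them, B lists them).
def Pre_make_tagged_results_table (tags : List String) (queries : List String) (query_results : List (String × List (String × Int))) : Prop :=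
  (∀ q ∈ queries, q ∈ query_results.map Prod.fst) ∧
  (∀ q ∈ queries, ∀ q' ∈ queries, ∀ d ∈ pvKeysOf query_results q, d ∈ pvKeysOf query_results q') ∧
  (∀ q ∈ queries, pvKeysOf query_results q ≠ [])
instance (tags : List String) (queries : List String) (query_results : List (String × List (String × Int))) : Decidable (Pre_make_tagged_results_table tags queries query_results) := by unfold Pre_make_tagged_results_table; infer_instance

def pvWitness_make_tagged_results_table : List String × List String × (List (String × List (String × Int))) :=
  (["state"], ["ca:cases", "ca:deaths", "wa:cases"],
   [("ca:cases", [("2020-01-01", 3), ("2020-01-02", 5)]),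
    ("ca:deaths", [("2020-01-01", 0), ("2020-01-02", 1)]),
    ("wa:cases", [("2020-01-01", 2), ("2020-01-02", 4)])])

def Spec_make_tagged_results_table (tags : List String) (queries : List String) (query_results : List (String × List (String × Int))) (out : List (List String)) : Prop := out = make_tagged_results_table_alt tags queries query_results
instance (tags : List String) (queries : List String) (query_results : List (String × List (String × Int))) (out : List (List String)) : Decidable (Spec_make_tagged_results_table tags queries query_results out) := by unfold Spec_make_tagged_results_table; infer_instance

-- ===== CLAIM (what is proved, stated in full; the proofs are below) =====
def Claim_equal_make_tagged_results_table : Prop := ∀ (tags : List String) (queries : List String) (query_results : List (String × List (String × Int))), Dom_make_tagged_results_table tags queries query_results → Pre_make_tagged_results_table tags queries query_results → Spec_make_tagged_results_table tags queries query_results (make_tagged_results_table tags queries query_results)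

-- ===== LEMMAS AND PROOFS =====

-- proof-side names for the values both ports compute from a query name
def pvTag (n : String) : List String :=
  PySem.List.slice ((PySem.Str.split? n ":").getD []) none (some (-1))
def pvMet (n : String) : String :=
  PySem.List.pyGetD ((PySem.Str.split? n ":").getD []) (-1) ""
def pvVal (query_results : List (String × List (String × Int))) (date n : String) : Int :=
  (PySem.Dict.ofList ((PySem.Dict.ofList query_results).getD n [])).getD date 0

-- A's inner-loop body, simplified
def pvStep (query_results : List (String × List (String × Int))) (date : String)
    (td : PySem.Dict (List String) (PySem.Dict String Int)) (name : String) :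
    PySem.Dict (List String) (PySem.Dict String Int) :=
  td.insert (pvTag name)
    ((td.getD (pvTag name) PySem.Dict.empty).insert (pvMet name) (pvVal query_results date name))

-- B's lookup-building step
def pvLkStep (lkp : PySem.Dict (List String × String) String) (name : String) :
    PySem.Dict (List String × String) String :=
  lkp.insert (pvTag name, pvMet name) name

theorem pvA_inner_eq (qr : List (String × List (String × Int))) (queries : List String) (date : String) :
    pvA_inner qr queries date = queries.foldl (pvStep qr date) PySem.Dict.empty := by
  unfold pvA_inner
  apply PySem.List.foldl_congr_mem
  intro td name _
  simp only [pvStep, pvTag, pvMet, pvVal]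
  split_ifs with h
  · rfl
  · have h' := eq_false_of_ne_true h
    rw [PySem.Dict.getD_insert_self, PySem.Dict.insert_insert_self,
      PySem.Dict.getD_of_not_contains td PySem.Dict.empty h']

theorem pvFoldl_triple {β σ₁ σ₂ σ₃ : Type} (f : σ₁ → β → σ₁) (g : σ₂ → β → σ₂) (h : σ₃ → β → σ₃)
    (l : List β) (a : σ₁) (b : σ₂) (c : σ₃) :
    l.foldl (fun s e => (f s.1 e, g s.2.1 e, h s.2.2 e)) (a, b, c) =
      (l.foldl f a, l.foldl g b, l.foldl h c) := by
  induction l generalizing a b c with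
  | nil => rfl
  | cons x xs ih => exact ih (f a x) (g b x) (h c x)

theorem pvB_parse_eq (queries : List String) :
    pvB_parse queries =
      (queries.foldl pvLkStep PySem.Dict.empty,
       queries.foldl (fun s n => PySem.Set.add s (pvTag n)) PySem.Set.empty,
       queries.foldl (fun s n => PySem.Set.add s (pvMet n)) PySem.Set.empty) :=
  pvFoldl_triple
    (fun (d : PySem.Dict (List String × String) String) n => d.insert (pvTag n, pvMet n) n)
    (fun (s : PySem.Set (List String)) n => s.add (pvTag n))
    (fun (s : PySem.Set String) n => s.add (pvMet n))
    queries PySem.Dict.empty PySem.Set.empty PySem.Set.empty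

theorem pvSetFold_eq_ofList {α : Type} [BEq α] [LawfulBEq α] (l : List String) (f : String → α) :
    l.foldl (fun s n => PySem.Set.add s (f n)) PySem.Set.empty = PySem.Set.ofList (l.map f) := by
  rw [← PySem.Set.update_map_eq_foldl_add, PySem.Set.update_empty]

theorem pvB_lookup_eq (queries : List String) :
    (pvB_parse queries).1 = queries.foldl pvLkStep PySem.Dict.empty := by
  rw [pvB_parse_eq]

theorem pvB_tags_eq (queries : List String) :
    (pvB_parse queries).2.1 = PySem.Set.ofList (queries.map pvTag) := by
  rw [pvB_parse_eq]
  exact pvSetFold_eq_ofList queries pvTag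

theorem pvB_mets_eq (queries : List String) :
    (pvB_parse queries).2.2 = PySem.Set.ofList (queries.map pvMet) := by
  rw [pvB_parse_eq]
  exact pvSetFold_eq_ofList queries pvMet

theorem pvInner_keys (qr : List (String × List (String × Int))) (queries : List String) (date : String) :
    (pvA_inner qr queries date).keys = PySem.Set.ofList (queries.map pvTag) := by
  rw [pvA_inner_eq]
  have h := PySem.Dict.keys_foldl_insert_key queries pvTag
    (fun td n => ((td.getD (pvTag n) PySem.Dict.empty).insert (pvMet n) (pvVal qr date n)))
    PySem.Dict.empty
  exact h.trans (PySem.Set.update_empty _)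

-- the per-date cell invariant: A's nested dicts vs B's flat lookup
def pvInv (qr : List (String × List (String × Int))) (date : String)
    (td : PySem.Dict (List String) (PySem.Dict String Int))
    (lkp : PySem.Dict (List String × String) String) : Prop :=
  ∀ tag m, ((td.getD tag PySem.Dict.empty).getD m 0) =
    (match lkp.get? (tag, m) with
     | some n => pvVal qr date n
     | none => 0)

theorem pvInv_fold (qr : List (String × List (String × Int))) (date : String) (l : List String)
    (td : PySem.Dict (List String) (PySem.Dict String Int))
    (lkp : PySem.Dict (List String × String) String) (h : pvInv qr date td lkp) :
    pvInv qr date (l.foldl (pvStep qr date) td) (l.foldl pvLkStep lkp) := by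
  induction l generalizing td lkp with
  | nil => exact h
  | cons a l ih =>
    refine ih _ _ ?_
    intro tag m
    unfold pvStep pvLkStep
    rw [PySem.Dict.getD_insert, PySem.Dict.get?_insert]
    split_ifs with h1 h2 h2
    · subst h1
      have hm : m = pvMet a := (Prod.mk.injEq _ _ _ _ ▸ h2).2
      subst hm
      rw [PySem.Dict.getD_insert_self]
    · subst h1
      have hm : m ≠ pvMet a := fun e => h2 (by rw [e])
      rw [PySem.Dict.getD_insert_of_ne _ _ _ hm]
      exact h (pvTag a) m
    · exact absurd (Prod.mk.injEq _ _ _ _ ▸ h2).1 h1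
    · exact h tag m

theorem pvInv_inner (qr : List (String × List (String × Int))) (queries : List String) (date : String) :
    pvInv qr date (pvA_inner qr queries date) (queries.foldl pvLkStep PySem.Dict.empty) := by
  rw [pvA_inner_eq]
  apply pvInv_fold
  intro tag m
  simp [PySem.Dict.getD_empty, PySem.Dict.get?_empty]

-- lookups into a dict built by inserting a value computed from each (distinct) key
theorem pvGetD_foldl_insert_not_mem {κ ν : Type} [BEq κ] [LawfulBEq κ] (l : List κ) (f : κ → ν)
    (d : PySem.Dict κ ν) (v : ν) (x : κ) (h : x ∉ l) :
    (l.foldl (fun d k => d.insert k (f k)) d).getD x v = d.getD x v := by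
  induction l generalizing d with
  | nil => rfl
  | cons a l ih =>
    simp only [List.mem_cons, not_or] at h
    rw [List.foldl_cons, ih _ h.2, PySem.Dict.getD_insert_of_ne _ _ _ h.1]

theorem pvGetD_foldl_insert_fn {κ ν : Type} [BEq κ] [LawfulBEq κ] (l : List κ) (f : κ → ν)
    (d : PySem.Dict κ ν) (v : ν) (hn : l.Nodup) (x : κ) (hx : x ∈ l) :
    (l.foldl (fun d k => d.insert k (f k)) d).getD x v = f x := by
  induction l generalizing d with
  | nil => cases hx
  | cons a l ih =>
    rw [List.foldl_cons]
    rcases List.mem_cons.mp hx with rfl | hx'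
    · rw [pvGetD_foldl_insert_not_mem _ _ _ _ _ (List.nodup_cons.mp hn).1,
        PySem.Dict.getD_insert_self]
    · exact ih _ (List.nodup_cons.mp hn).2 hx' 

-- membership / nodup through set-accumulating folds
theorem pvMem_foldl_acc {α β : Type} (l : List β) (F : PySem.Set α → β → PySem.Set α)
    (P : β → α → Prop) (hF : ∀ s x y, y ∈ F s x ↔ y ∈ s ∨ P x y) (s : PySem.Set α) (y : α) :
    y ∈ l.foldl F s ↔ y ∈ s ∨ ∃ x ∈ l, P x y := by
  induction l generalizing s with
  | nil => simp
  | cons a l ih =>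
    rw [List.foldl_cons, ih, hF]
    simp only [List.mem_cons]
    constructor
    · rintro ((hy | hp) | ⟨x, hx, hp⟩)
      · exact Or.inl hy
      · exact Or.inr ⟨a, Or.inl rfl, hp⟩
      · exact Or.inr ⟨x, Or.inr hx, hp⟩
    · rintro (hy | ⟨x, (rfl | hx), hp⟩)
      · exact Or.inl (Or.inl hy)
      · exact Or.inl (Or.inr hp)
      · exact Or.inr ⟨x, hx, hp⟩

theorem pvNodup_foldl_acc {α β : Type} (l : List β) (F : PySem.Set α → β → PySem.Set α)
    (hF : ∀ s x, s.Nodup → (F s x).Nodup) (s : PySem.Set α) (hs : s.Nodup) :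
    (l.foldl F s).Nodup := by
  induction l generalizing s with
  | nil => exact hs
  | cons a l ih => exact ih _ (hF _ _ hs)

theorem pvMem_dates (qr : List (String × List (String × Int))) (queries : List String) (d : String) :
    d ∈ pvA_dates qr queries ↔ ∃ q ∈ queries, d ∈ pvKeysOf qr q := by
  have h1 := pvMem_foldl_acc queries
    (fun s q => PySem.Set.union s (PySem.Dict.ofList ((PySem.Dict.ofList qr).getD q [])).keys)
    (fun q y => y ∈ pvKeysOf qr q)
    (fun s x y => PySem.Set.mem_union s _ y) PySem.Set.empty d
  refine Iff.trans h1 ?_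
  simp [PySem.Set.empty]

theorem pvNodup_dates (qr : List (String × List (String × Int))) (queries : List String) :
    (pvA_dates qr queries).Nodup := by
  unfold pvA_dates
  exact pvNodup_foldl_acc _ _ (fun s x hs => PySem.Set.nodup_union s _ hs) _ List.nodup_nil

theorem pvTagged_getD (qr : List (String × List (String × Int))) (queries : List String)
    (date : String) (hd : date ∈ pvA_dates qr queries) :
    (pvA_tagged qr queries).getD date PySem.Dict.empty = pvA_inner qr queries date := by
  exact pvGetD_foldl_insert_fn (pvA_dates qr queries) (fun d => pvA_inner qr queries d)
    PySem.Dict.empty PySem.Dict.empty (pvNodup_dates qr queries) date hd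

-- metric keys of one tag's inner dict
theorem pvMem_inner_metrics (qr : List (String × List (String × Int))) (date : String)
    (l : List String) (td : PySem.Dict (List String) (PySem.Dict String Int))
    (tag : List String) (m : String) :
    m ∈ ((l.foldl (pvStep qr date) td).getD tag PySem.Dict.empty).keys ↔
      m ∈ ((td.getD tag PySem.Dict.empty).keys) ∨ ∃ n ∈ l, pvTag n = tag ∧ pvMet n = m := by
  induction l generalizing td with
  | nil => simp
  | cons a l ih =>
    rw [List.foldl_cons, ih]
    have hstep : m ∈ (((pvStep qr date td a).getD tag PySem.Dict.empty).keys) ↔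
        m ∈ ((td.getD tag PySem.Dict.empty).keys) ∨ (pvTag a = tag ∧ pvMet a = m) := by
      unfold pvStep
      rw [PySem.Dict.getD_insert]
      by_cases ht : tag = pvTag a
      · subst ht
        rw [if_pos rfl, PySem.Dict.mem_keys_insert]
        constructor
        · rintro (rfl | hm)
          · exact Or.inr ⟨rfl, rfl⟩
          · exact Or.inl hm
        · rintro (hm | ⟨-, rfl⟩)
          · exact Or.inr hm
          · exact Or.inl rfl
      · rw [if_neg ht]
        constructor
        · exact Or.inl
        · rintro (hm | ⟨rfl, -⟩)
          · exact hm
          · exact absurd rfl ht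
    rw [hstep]
    simp only [List.mem_cons]
    constructor
    · rintro ((hm | hp) | ⟨n, hn, hp⟩)
      · exact Or.inl hm
      · exact Or.inr ⟨a, Or.inl rfl, hp⟩
      · exact Or.inr ⟨n, Or.inr hn, hp⟩
    · rintro (hm | ⟨n, (rfl | hn), hp⟩)
      · exact Or.inl (Or.inl hm)
      · exact Or.inl (Or.inr hp)
      · exact Or.inr ⟨n, hn, hp⟩

theorem pvMem_metrics (qr : List (String × List (String × Int))) (queries : List String)
    (hne : ∀ q ∈ queries, pvKeysOf qr q ≠ []) (m : String) :
    m ∈ pvA_metrics qr queries ↔ ∃ n ∈ queries, pvMet n = m := by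
  have houter := pvMem_foldl_acc (pvA_dates qr queries)
    (fun s date =>
      ((pvA_tagged qr queries).getD date PySem.Dict.empty).keys.foldl
        (fun s tag =>
          PySem.Set.union s
            (((pvA_tagged qr queries).getD date PySem.Dict.empty).getD tag PySem.Dict.empty).keys)
        s)
    (fun date y => ∃ tag ∈ ((pvA_tagged qr queries).getD date PySem.Dict.empty).keys,
      y ∈ (((pvA_tagged qr queries).getD date PySem.Dict.empty).getD tag PySem.Dict.empty).keys)
    (fun s date y => pvMem_foldl_acc _ _
      (fun tag z => z ∈ (((pvA_tagged qr queries).getD date PySem.Dict.empty).getD tag PySem.Dict.empty).keys)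
      (fun s' x y' => PySem.Set.mem_union s' _ y') s y)
    PySem.Set.empty m
  refine Iff.trans houter ?_
  simp only [PySem.Set.empty, List.not_mem_nil, false_or]
  constructor
  · rintro ⟨date, hd, tag, htag, hm⟩
    rw [pvTagged_getD qr queries date hd, pvA_inner_eq] at hm
    rcases (pvMem_inner_metrics qr date queries PySem.Dict.empty tag m).mp hm with h0 | ⟨n, hn, _, hmet⟩
    · rw [PySem.Dict.getD_empty, PySem.Dict.keys_empty] at h0
      cases h0
    · exact ⟨n, hn, hmet⟩
  · rintro ⟨n, hn, rfl⟩
    have hk := hne n hn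
    obtain ⟨d, hd⟩ := List.exists_mem_of_ne_nil _ hk
    have hdates : d ∈ pvA_dates qr queries := (pvMem_dates qr queries d).mpr ⟨n, hn, hd⟩
    refine ⟨d, hdates, pvTag n, ?_, ?_⟩
    · rw [pvTagged_getD qr queries d hdates, pvInner_keys, PySem.Set.mem_ofList]
      exact List.mem_map_of_mem hn
    · rw [pvTagged_getD qr queries d hdates, pvA_inner_eq]
      exact (pvMem_inner_metrics qr d queries PySem.Dict.empty (pvTag n) (pvMet n)).mpr
        (Or.inr ⟨n, hn, rfl, rfl⟩)

theorem pvNodup_metrics (qr : List (String × List (String × Int))) (queries : List String) :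
    (pvA_metrics qr queries).Nodup := by
  unfold pvA_metrics
  refine pvNodup_foldl_acc _ _ ?_ _ List.nodup_nil
  intro s date hs
  exact pvNodup_foldl_acc _ _ (fun s' x hs' => PySem.Set.nodup_union s' _ hs') _ hs

theorem pvMetric_columns_eq (qr : List (String × List (String × Int))) (queries : List String)
    (hne : ∀ q ∈ queries, pvKeysOf qr q ≠ []) :
    PySem.List.sorted (pvA_metrics qr queries) (fun m => m) false =
      PySem.List.sorted (pvB_parse queries).2.2 (fun m => m) false := by
  rw [pvB_mets_eq]
  refine PySem.List.sorted_eq_sorted_of_perm _ _ _ (fun _ _ h => h) ?_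
  refine (List.perm_ext_iff_of_nodup (pvNodup_metrics qr queries) (PySem.Set.nodup_ofList _)).mpr ?_
  intro m
  rw [pvMem_metrics qr queries hne m, PySem.Set.mem_ofList]
  simp

theorem pvDates_eq (qr : List (String × List (String × Int))) (queries : List String) :
    pvA_dates qr queries = pvB_dates qr queries := rfl

-- the per-cell string equality, for dates actually occurring in the table
theorem pvCell_eq (qr : List (String × List (String × Int))) (queries : List String)
    (date : String) (hd : date ∈ pvA_dates qr queries) (tag : List String) (m : String) :
    PySem.Int.toStr ((((pvA_tagged qr queries).getD date PySem.Dict.empty).getD tag PySem.Dict.empty).getD m 0) =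
      (match (queries.foldl pvLkStep PySem.Dict.empty).get? (tag, m) with
       | some name => PySem.Int.toStr ((PySem.Dict.ofList ((PySem.Dict.ofList qr).getD name [])).getD date 0)
       | none => "0") := by
  rw [pvTagged_getD qr queries date hd]
  have hc := pvInv_inner qr queries date
  unfold pvInv at hc
  rw [hc tag m]
  rcases hget : (queries.foldl pvLkStep PySem.Dict.empty).get? (tag, m) with _ | n
  · show PySem.Int.toStr 0 = "0"
    rfl
  · exact rfl

-- ===== VERDICT (by name: the statement is the Claim_ definition above) =====
theorem make_tagged_results_table_spec : Claim_equal_make_tagged_results_table := by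
  intro tags queries qr _ hPre
  obtain ⟨-, -, h3⟩ := hPre
  unfold Spec_make_tagged_results_table make_tagged_results_table make_tagged_results_table_alt
  simp only []
  rw [pvB_lookup_eq, pvB_tags_eq, ← pvMetric_columns_eq qr queries h3, ← pvDates_eq]
  apply PySem.List.foldl_congr_mem
  intro rows date hdate
  have hd : date ∈ pvA_dates qr queries := (PySem.List.mem_sorted _ _ _ _).mp hdate
  rw [pvTagged_getD qr queries date hd, pvInner_keys]
  apply PySem.List.foldl_congr_mem
  intro rows' tag htag
  congr 1
  congr 1
  apply PySem.List.foldl_congr_mem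
  intro r m hm
  congr 1
  congr 1
  rw [← pvTagged_getD qr queries date hd]
  exact pvCell_eq qr queries date hd tag m
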